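-- pv_equiv track=rewrite | github.com/Bhargav-CS/Python-dsa | coverage_of_all_zeros_in_a_binary_matrix.py | findCoverage
-- ===== SOURCE A (Python) =====
-- def findCoverage(matrix):
--     n, m = len(matrix), len(matrix[0])
--     ans = 0
--     for i in range(n):
--         for j in range(m):
--             if matrix[i][j] == 0:
--                 #left search
--                 if (j - 1) >=0 and matrix[i][j-1]:
--                     ans +=1
--
--                 #right search
--                 if (j + 1) < m and matrix [i][j+1]:
--                     ans += 1
--
--                 #down search
--                 if (i + 1) < n and matrix[i+1][j]:
--                     ans +=1
--
--                 #up search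
--                 if (i - 1) >= 0 and matrix[i-1][j]:
--                     ans +=1
--
--     return ans
-- ===== SOURCE B (Python) =====
-- def findCoverage(matrix):
--     n, m = len(matrix), len(matrix[0])
--     rows = [row[:m] for row in matrix]
--     ans = 0
--     # horizontal adjacencies: consecutive pairs inside each row
--     for row in rows:
--         for a, b in zip(row, row[1:]):
--             ans += (a == 0 and bool(b)) + (b == 0 and bool(a))
--     # vertical adjacencies: aligned pairs of consecutive rows
--     for r1, r2 in zip(rows, rows[1:]):
--         for a, c in zip(r1, r2):
--             ans += (a == 0 and bool(c)) + (c == 0 and bool(a))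
--     return ans
-- ===== Notes on version B (the rewrite author's own statement) =====
-- stated objective: alternative
-- what changed: B trims rows to the first row's width and then sums over zipped value pairs (each row zipped with its tail, and consecutive rows zipped together), scoring every adjacency once with no index arithmetic, instead of A's index-based four-direction scan around every zero cell.
import Mathlib
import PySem

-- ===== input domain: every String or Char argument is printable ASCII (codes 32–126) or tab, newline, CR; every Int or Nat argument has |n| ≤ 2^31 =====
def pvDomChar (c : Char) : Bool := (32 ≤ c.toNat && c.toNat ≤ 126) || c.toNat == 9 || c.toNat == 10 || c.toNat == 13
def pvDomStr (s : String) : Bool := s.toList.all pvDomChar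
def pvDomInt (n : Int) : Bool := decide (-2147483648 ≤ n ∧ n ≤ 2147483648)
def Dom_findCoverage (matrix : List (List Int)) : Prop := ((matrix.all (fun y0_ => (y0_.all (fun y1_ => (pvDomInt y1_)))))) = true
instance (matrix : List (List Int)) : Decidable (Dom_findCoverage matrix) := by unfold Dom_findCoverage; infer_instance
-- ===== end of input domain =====

-- B trims rows to the first row's width and sums over zipped value pairs (each row zipped with
-- its tail, consecutive rows zipped together), scoring each adjacency once without index
-- arithmetic, instead of A's index-based four-direction scan around every zero cell; equivalence
-- of the return values is proved on Pre_ (A raises IndexError on an empty matrix or when a row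
-- is shorter than the first row).

-- ===== PORT A =====
-- loop body of A (the four guarded increments around a zero cell), kept as a helper
def stepA (matrix : List (List Int)) (n m i j ans : Int) : Int :=
  if PySem.List.pyGetD (PySem.List.pyGetD matrix i []) j 0 = 0 then
    let ans := if 0 ≤ j - 1 ∧ PySem.List.pyGetD (PySem.List.pyGetD matrix i []) (j - 1) 0 ≠ 0 then ans + 1 else ans
    let ans := if j + 1 < m ∧ PySem.List.pyGetD (PySem.List.pyGetD matrix i []) (j + 1) 0 ≠ 0 then ans + 1 else ans
    let ans := if i + 1 < n ∧ PySem.List.pyGetD (PySem.List.pyGetD matrix (i + 1) []) j 0 ≠ 0 then ans + 1 else ans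
    let ans := if 0 ≤ i - 1 ∧ PySem.List.pyGetD (PySem.List.pyGetD matrix (i - 1) []) j 0 ≠ 0 then ans + 1 else ans
    ans
  else ans

def findCoverage (matrix : List (List Int)) : Int :=
  let n : Int := PySem.List.len matrix
  let m : Int := PySem.List.len (PySem.List.pyGetD matrix 0 [])
  (PySem.List.pyRange 0 n 1).foldl (fun ans i =>
    (PySem.List.pyRange 0 m 1).foldl (fun ans j => stepA matrix n m i j ans) ans) 0

-- ===== PORT B =====
-- '(a == 0 and bool(b)) + (b == 0 and bool(a))' for one adjacent pair of values
def edgeScore (a b : Int) : Int :=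
  (if a = 0 ∧ b ≠ 0 then 1 else 0) + (if b = 0 ∧ a ≠ 0 then 1 else 0)

def findCoverage_alt (matrix : List (List Int)) : Int :=
  let m : Int := PySem.List.len (PySem.List.pyGetD matrix 0 [])
  let rows := matrix.map (fun row => PySem.List.slice row none (some m))
  -- horizontal adjacencies: consecutive pairs inside each row
  let ans : Int := rows.foldl (fun ans row =>
    (row.zip (PySem.List.slice row (some 1) none)).foldl
      (fun ans p => ans + edgeScore p.1 p.2) ans) 0
  -- vertical adjacencies: aligned pairs of consecutive rows
  (rows.zip (PySem.List.slice rows (some 1) none)).foldl (fun ans pr =>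
    (pr.1.zip pr.2).foldl (fun ans p => ans + edgeScore p.1 p.2) ans) ans

-- ===== PRECONDITION & SPEC =====
-- Pre_ excludes exactly the inputs where Python A raises IndexError: the empty matrix
-- (len(matrix[0])) and matrices with a row shorter than the first row (matrix[i][j], j < m).
def Pre_findCoverage (matrix : List (List Int)) : Prop :=
  matrix ≠ [] ∧ ∀ row ∈ matrix, (matrix.headD []).length ≤ row.length
instance (matrix : List (List Int)) : Decidable (Pre_findCoverage matrix) := by
  unfold Pre_findCoverage; infer_instance

def pvWitness_findCoverage : List (List Int) := [[0, 1], [1, 0]]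

def Spec_findCoverage (matrix : List (List Int)) (out : Int) : Prop := out = findCoverage_alt matrix
instance (matrix : List (List Int)) (out : Int) : Decidable (Spec_findCoverage matrix out) := by
  unfold Spec_findCoverage; infer_instance

-- ===== CLAIM (what is proved, stated in full; the proofs are below) =====
def Claim_equal_findCoverage : Prop := ∀ (matrix : List (List Int)), Dom_findCoverage matrix → Pre_findCoverage matrix → Spec_findCoverage matrix (findCoverage matrix)

-- ===== LEMMAS AND PROOFS =====

-- matrix[i][j] with out-of-range defaulting to 0 (A only reads in-range cells on Pre_)
def gM (matrix : List (List Int)) (i j : Int) : Int :=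
  PySem.List.pyGetD (PySem.List.pyGetD matrix i []) j 0

-- the directed adjacency indicators of A, one flat condition each
def cL (matrix : List (List Int)) (i j : Int) : Int :=
  if 0 ≤ j - 1 ∧ gM matrix i j = 0 ∧ gM matrix i (j - 1) ≠ 0 then 1 else 0
def cR (matrix : List (List Int)) (m i j : Int) : Int :=
  if j + 1 < m ∧ gM matrix i j = 0 ∧ gM matrix i (j + 1) ≠ 0 then 1 else 0
def cD (matrix : List (List Int)) (n i j : Int) : Int :=
  if i + 1 < n ∧ gM matrix i j = 0 ∧ gM matrix (i + 1) j ≠ 0 then 1 else 0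
def cU (matrix : List (List Int)) (i j : Int) : Int :=
  if 0 ≤ i - 1 ∧ gM matrix i j = 0 ∧ gM matrix (i - 1) j ≠ 0 then 1 else 0
def cH2 (matrix : List (List Int)) (m i j : Int) : Int :=
  if j + 1 < m ∧ gM matrix i (j + 1) = 0 ∧ gM matrix i j ≠ 0 then 1 else 0
def cV2 (matrix : List (List Int)) (n i j : Int) : Int :=
  if i + 1 < n ∧ gM matrix (i + 1) j = 0 ∧ gM matrix i j ≠ 0 then 1 else 0

-- an unguarded horizontal pair (zero at x+1, non-zero at x) and the row-sum of vertical pairs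
def cellPair (matrix : List (List Int)) (i x : Int) : Int :=
  if gM matrix i (x + 1) = 0 ∧ gM matrix i x ≠ 0 then 1 else 0
def vPair (matrix : List (List Int)) (s j : Int) : Int :=
  if gM matrix (s + 1) j = 0 ∧ gM matrix s j ≠ 0 then 1 else 0
def rowPair (matrix : List (List Int)) (m s : Int) : Int :=
  ((PySem.List.pyRange 0 m 1).map (vPair matrix s)).sum

-- the double sum ∑_{i<n} ∑_{j<m} f i j as A's port produces it
def SS (n m : Int) (f : Int → Int → Int) : Int :=
  ((PySem.List.pyRange 0 n 1).map (fun i => ((PySem.List.pyRange 0 m 1).map (f i)).sum)).sum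

-- B's per-row and per-row-pair sums
def hSum (row : List Int) : Int := ((row.zip row.tail).map (fun p => edgeScore p.1 p.2)).sum
def vSum (r1 r2 : List Int) : Int := ((r1.zip r2).map (fun p => edgeScore p.1 p.2)).sum

lemma stepA_eq (matrix : List (List Int)) (n m i j ans : Int) :
    stepA matrix n m i j ans
      = ans + (cL matrix i j + cR matrix m i j + cD matrix n i j + cU matrix i j) := by
  simp only [stepA, cL, cR, cD, cU, gM]
  split_ifs <;> omega

lemma foldfold_sum (n m : Int) (step : Int → Int → Int → Int) (c : Int → Int → Int)
    (h : ∀ i j ans, step i j ans = ans + c i j) :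
    (PySem.List.pyRange 0 n 1).foldl (fun ans i =>
      (PySem.List.pyRange 0 m 1).foldl (fun ans j => step i j ans) ans) 0 = SS n m c := by
  have h1 : (fun (ans i : Int) =>
        (PySem.List.pyRange 0 m 1).foldl (fun ans j => step i j ans) ans)
      = fun ans i => ans + ((PySem.List.pyRange 0 m 1).map (c i)).sum := by
    funext ans i
    have h2 : (fun (ans j : Int) => step i j ans) = fun ans j => ans + c i j := by
      funext ans j; exact h i j ans
    rw [h2, PySem.List.foldl_add]
  rw [h1, PySem.List.foldl_add, zero_add]
  rfl

lemma SS_add (n m : Int) (f g : Int → Int → Int) :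
    SS n m (fun i j => f i j + g i j) = SS n m f + SS n m g := by
  unfold SS
  have h1 : (fun i => ((PySem.List.pyRange 0 m 1).map (fun j => f i j + g i j)).sum)
      = fun i => ((PySem.List.pyRange 0 m 1).map (f i)).sum
              + ((PySem.List.pyRange 0 m 1).map (g i)).sum := by
    funext i; exact PySem.List.sum_map_add_int _ _ _
  rw [h1]
  exact PySem.List.sum_map_add_int _ _ _

-- the index shift: summing "h at the left neighbour" over a range equals summing
-- "h here, if a right neighbour exists" over the same range
lemma shiftInt (h : Int → Int) (K : Int) :
    ((PySem.List.pyRange 0 K 1).map (fun x => if 0 ≤ x - 1 then h (x - 1) else 0)).sum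
      = ((PySem.List.pyRange 0 K 1).map (fun x => if x + 1 < K then h x else 0)).sum := by
  by_cases hK : K ≤ 0
  · rw [PySem.List.pyRange_one_eq_nil hK]
    rfl
  · have hK' : (0:Int) < K := by omega
    have hL : ((PySem.List.pyRange 0 K 1).map (fun x => if 0 ≤ x - 1 then h (x - 1) else 0)).sum
        = ((PySem.List.pyRange 0 (K - 1) 1).map h).sum := by
      rw [PySem.List.pyRange_one_cons hK']
      simp only [List.map_cons, List.sum_cons, zero_add]
      rw [if_neg (by omega : ¬ (0:Int) ≤ 0 - 1), zero_add]
      rw [PySem.List.pyRange_one 1 K, PySem.List.pyRange_one 0 (K - 1)]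
      simp only [List.map_map, Function.comp_def, sub_zero]
      congr 1
      apply List.map_congr_left
      intro k _
      rw [if_pos (by omega : (0:Int) ≤ 1 + (k:Int) - 1)]
      congr 1
      omega
    have hR : ((PySem.List.pyRange 0 K 1).map (fun x => if x + 1 < K then h x else 0)).sum
        = ((PySem.List.pyRange 0 (K - 1) 1).map h).sum := by
      have hsplit : PySem.List.pyRange 0 K 1
          = PySem.List.pyRange 0 (K - 1) 1 ++ PySem.List.pyRange (K - 1) K 1 :=
        PySem.List.pyRange_one_append 0 (K - 1) K (by omega) (by omega)
      have hsing : PySem.List.pyRange (K - 1) K 1 = [K - 1] := by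
        have h2 := PySem.List.pyRange_one_singleton (K - 1)
        rw [sub_add_cancel] at h2
        exact h2
      rw [hsplit, hsing, List.map_append, List.sum_append]
      simp only [List.map_cons, List.map_nil, List.sum_cons, List.sum_nil]
      rw [if_neg (by omega : ¬ (K - 1) + 1 < K), add_zero, add_zero]
      congr 1
      apply List.map_congr_left
      intro x hx
      have hxlt : x < K - 1 := (PySem.List.mem_pyRange_one.mp hx).2
      rw [if_pos (by omega : x + 1 < K)]
    rw [hL, hR]

lemma SS_L_eq_H2 (matrix : List (List Int)) (n m : Int) :
    SS n m (cL matrix) = SS n m (cH2 matrix m) := by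
  unfold SS
  congr 1
  apply List.map_congr_left
  intro i _
  have h1 : cL matrix i = fun j => if 0 ≤ j - 1 then cellPair matrix i (j - 1) else 0 := by
    funext j
    unfold cL cellPair
    by_cases hj : (0:Int) ≤ j - 1
    · rw [if_pos hj, sub_add_cancel]
      exact if_congr ⟨fun h => h.2, fun h => ⟨hj, h⟩⟩ rfl rfl
    · rw [if_neg hj, if_neg (fun h => hj h.1)]
  have h2 : cH2 matrix m i = fun j => if j + 1 < m then cellPair matrix i j else 0 := by
    funext j
    unfold cH2 cellPair
    by_cases hj : j + 1 < m
    · rw [if_pos hj]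
      exact if_congr ⟨fun h => h.2, fun h => ⟨hj, h⟩⟩ rfl rfl
    · rw [if_neg hj, if_neg (fun h => hj h.1)]
  rw [h1, h2]
  exact shiftInt (cellPair matrix i) m

lemma SS_U_eq_V2 (matrix : List (List Int)) (n m : Int) :
    SS n m (cU matrix) = SS n m (cV2 matrix n) := by
  unfold SS
  have h1 : (fun i => ((PySem.List.pyRange 0 m 1).map (cU matrix i)).sum)
      = fun i => if 0 ≤ i - 1 then rowPair matrix m (i - 1) else 0 := by
    funext i
    by_cases hi : (0:Int) ≤ i - 1
    · rw [if_pos hi]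
      unfold rowPair
      congr 1
      apply List.map_congr_left
      intro j _
      unfold cU vPair
      rw [sub_add_cancel]
      exact if_congr ⟨fun h => h.2, fun h => ⟨hi, h⟩⟩ rfl rfl
    · rw [if_neg hi]
      have hz : (PySem.List.pyRange 0 m 1).map (cU matrix i)
          = (PySem.List.pyRange 0 m 1).map (fun _ => (0:Int)) := by
        apply List.map_congr_left
        intro j _
        unfold cU
        exact if_neg (fun h => hi h.1)
      rw [hz]
      simp
  have h2 : (fun i => ((PySem.List.pyRange 0 m 1).map (cV2 matrix n i)).sum)
      = fun i => if i + 1 < n then rowPair matrix m i else 0 := by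
    funext i
    by_cases hi : i + 1 < n
    · rw [if_pos hi]
      unfold rowPair
      congr 1
      apply List.map_congr_left
      intro j _
      unfold cV2 vPair
      exact if_congr ⟨fun h => h.2, fun h => ⟨hi, h⟩⟩ rfl rfl
    · rw [if_neg hi]
      have hz : (PySem.List.pyRange 0 m 1).map (cV2 matrix n i)
          = (PySem.List.pyRange 0 m 1).map (fun _ => (0:Int)) := by
        apply List.map_congr_left
        intro j _
        unfold cV2
        exact if_neg (fun h => hi h.1)
      rw [hz]
      simp
  rw [h1, h2]
  exact shiftInt (rowPair matrix m) n

-- A = SS of the edge-directed indicators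
lemma A_eq_SS (matrix : List (List Int)) :
    findCoverage matrix
      = SS (PySem.List.len matrix) (PySem.List.len (PySem.List.pyGetD matrix 0 []))
          (cR matrix (PySem.List.len (PySem.List.pyGetD matrix 0 [])))
        + SS (PySem.List.len matrix) (PySem.List.len (PySem.List.pyGetD matrix 0 []))
          (cH2 matrix (PySem.List.len (PySem.List.pyGetD matrix 0 [])))
        + SS (PySem.List.len matrix) (PySem.List.len (PySem.List.pyGetD matrix 0 []))
          (cD matrix (PySem.List.len matrix))
        + SS (PySem.List.len matrix) (PySem.List.len (PySem.List.pyGetD matrix 0 []))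
          (cV2 matrix (PySem.List.len matrix)) := by
  simp only [findCoverage]
  rw [foldfold_sum _ _ _ _ (fun i j ans => stepA_eq matrix _ _ i j ans)]
  set n := PySem.List.len matrix with hn
  set m := PySem.List.len (PySem.List.pyGetD matrix 0 []) with hm
  have hA : SS n m (fun i j => cL matrix i j + cR matrix m i j + cD matrix n i j + cU matrix i j)
      = SS n m (cL matrix) + SS n m (cR matrix m) + SS n m (cD matrix n) + SS n m (cU matrix) := by
    rw [SS_add n m (fun i j => cL matrix i j + cR matrix m i j + cD matrix n i j) (cU matrix),
        SS_add n m (fun i j => cL matrix i j + cR matrix m i j) (cD matrix n),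
        SS_add n m (cL matrix) (cR matrix m)]
  rw [hA, SS_L_eq_H2 matrix n m, SS_U_eq_V2 matrix n m]
  ring

-- ===== B-side lemmas =====

-- a sum over indices of a guarded consecutive pair equals the sum over the list zipped with its tail
lemma zipTailSum {α : Type} (F : α → α → Int) (d : α) (xs : List α) :
    ((List.range xs.length).map
        (fun k => if k + 1 < xs.length then F (xs.getD k d) (xs.getD (k + 1) d) else 0)).sum
      = ((xs.zip xs.tail).map (fun p => F p.1 p.2)).sum := by
  induction xs with
  | nil => rfl
  | cons x xs ih =>
    rw [List.length_cons, List.range_succ_eq_map]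
    simp only [List.map_cons, List.map_map, List.sum_cons, Function.comp_def]
    have hmap : (List.range xs.length).map
          (fun k => if k + 1 + 1 < xs.length + 1
            then F ((x :: xs).getD (k + 1) d) ((x :: xs).getD (k + 1 + 1) d) else 0)
        = (List.range xs.length).map
          (fun k => if k + 1 < xs.length then F (xs.getD k d) (xs.getD (k + 1) d) else 0) := by
      apply List.map_congr_left
      intro k _
      simp only [List.getD_cons_succ]
      exact if_congr (by omega) rfl rfl
    rw [hmap, ih]
    cases xs with
    | nil => simp
    | cons y t =>
      simp only [List.tail_cons, List.zip_cons_cons, List.map_cons, List.sum_cons,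
        List.getD_cons_zero, List.getD_cons_succ]
      rw [if_pos (by simp : 0 + 1 < (y :: t).length + 1)]

-- a sum over indices of aligned pairs of two equal-length lists equals the sum over their zip
lemma zipPairSum (F : Int → Int → Int) (xs ys : List Int) (h : xs.length = ys.length) :
    ((List.range xs.length).map (fun k => F (xs.getD k 0) (ys.getD k 0))).sum
      = ((xs.zip ys).map (fun p => F p.1 p.2)).sum := by
  induction xs generalizing ys with
  | nil => rfl
  | cons x xs ih =>
    cases ys with
    | nil => simp at h
    | cons y ys =>
      rw [List.length_cons, List.range_succ_eq_map]
      simp only [List.map_cons, List.map_map, List.sum_cons, Function.comp_def,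
        List.getD_cons_zero, List.getD_cons_succ, List.zip_cons_cons]
      rw [ih ys (by simpa using h)]

-- mapping a function of the k-th entry over range(len) is mapping it over the list
lemma rangeMapGetD {α : Type} (f : α → Int) (d : α) (xs : List α) :
    (List.range xs.length).map (fun k => f (xs.getD k d)) = xs.map f := by
  induction xs with
  | nil => rfl
  | cons x xs ih =>
    rw [List.length_cons, List.range_succ_eq_map]
    simp only [List.map_cons, List.map_map, Function.comp_def, List.getD_cons_zero,
      List.getD_cons_succ]
    rw [ih]

-- B as two sums over the trimmed rows
lemma B_eq_sums (matrix : List (List Int)) :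
    findCoverage_alt matrix
      = ((matrix.map (fun row =>
            PySem.List.slice row none (some (PySem.List.len (PySem.List.pyGetD matrix 0 []))))).map hSum).sum
        + (((matrix.map (fun row =>
              PySem.List.slice row none (some (PySem.List.len (PySem.List.pyGetD matrix 0 []))))).zip
            (matrix.map (fun row =>
              PySem.List.slice row none (some (PySem.List.len (PySem.List.pyGetD matrix 0 []))))).tail).map
            (fun pr => vSum pr.1 pr.2)).sum := by
  simp only [findCoverage_alt, PySem.List.slice_from_one]
  set rows := matrix.map (fun row =>
    PySem.List.slice row none (some (PySem.List.len (PySem.List.pyGetD matrix 0 [])))) with hrows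
  have h1 : (fun (ans : Int) (row : List Int) =>
        (row.zip row.tail).foldl (fun ans p => ans + edgeScore p.1 p.2) ans)
      = fun ans row => ans + hSum row := by
    funext ans row
    exact PySem.List.foldl_add _ _ _
  have h2 : (fun (ans : Int) (pr : List Int × List Int) =>
        (pr.1.zip pr.2).foldl (fun ans p => ans + edgeScore p.1 p.2) ans)
      = fun ans pr => ans + vSum pr.1 pr.2 := by
    funext ans pr
    exact PySem.List.foldl_add _ _ _
  rw [h1, h2, PySem.List.foldl_add, PySem.List.foldl_add, zero_add]

-- under Pre_, the trimmed rows all have length m0 and carry the same entries as the matrix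
lemma trim_getD (matrix : List (List Int)) (m0 : Nat)
    (i : Nat) (hi : i < matrix.length) (k : Nat) (hk : k < m0) :
    ((matrix.map (fun row => row.take m0)).getD i []).getD k 0
      = (matrix.getD i []).getD k 0 := by
  simp [List.getD_eq_getElem?_getD, hk, List.getElem?_eq_getElem hi]

-- the length of a trimmed row, under Pre_
lemma trim_len (matrix : List (List Int)) (m0 : Nat)
    (hrows : ∀ row ∈ matrix, m0 ≤ row.length)
    (i : Nat) (hi : i < matrix.length) :
    ((matrix.map (fun row => row.take m0)).getD i []).length = m0 := by
  rw [List.getD_eq_getElem?_getD, List.getElem?_eq_getElem (by simpa using hi :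
        i < (matrix.map (fun row => row.take m0)).length)]
  simp only [List.getElem_map, Option.getD_some, List.length_take]
  exact Nat.min_eq_left (hrows _ (List.getElem_mem hi))

-- the double pyRange sum over natural bounds, as nested range sums
lemma natSS (N m0 : Nat) (f : Int → Int → Int) :
    SS (N : Int) (m0 : Int) f
      = ((List.range N).map (fun i : Nat =>
          ((List.range m0).map (fun k : Nat => f (i : Int) (k : Int))).sum)).sum := by
  unfold SS
  rw [PySem.List.pyRange_zero_natCast, PySem.List.pyRange_zero_natCast]
  simp only [List.map_map, Function.comp_def]

-- the horizontal half of A's sum is B's row-wise zip sum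
lemma Hpart (matrix : List (List Int)) (m0 : Nat)
    (hrows : ∀ row ∈ matrix, m0 ≤ row.length) :
    SS (matrix.length : Int) (m0 : Int)
        (fun i j => cR matrix (m0 : Int) i j + cH2 matrix (m0 : Int) i j)
      = ((matrix.map (fun row => row.take m0)).map hSum).sum := by
  rw [natSS]
  have hmain : ∀ i ∈ List.range matrix.length,
      ((List.range m0).map (fun k : Nat =>
          cR matrix (m0 : Int) (i : Int) (k : Int) + cH2 matrix (m0 : Int) (i : Int) (k : Int))).sum
        = hSum ((matrix.map (fun row => row.take m0)).getD i []) := by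
    intro i hi
    rw [List.mem_range] at hi
    set Ri := (matrix.map (fun row => row.take m0)).getD i [] with hRidef
    have hRi : Ri.length = m0 := trim_len matrix m0 hrows i hi
    have hpt : ∀ k ∈ List.range m0,
        cR matrix (m0 : Int) i k + cH2 matrix (m0 : Int) i k
          = (if k + 1 < m0 then edgeScore (Ri.getD k 0) (Ri.getD (k + 1) 0) else 0) := by
      intro k hk
      rw [List.mem_range] at hk
      by_cases hk1 : k + 1 < m0
      · have e0 : gM matrix i k = Ri.getD k 0 := by
          simp only [gM, PySem.List.pyGetD_natCast]
          exact (trim_getD matrix m0 i hi k hk).symm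
        have e1 : gM matrix i ((k : Int) + 1) = Ri.getD (k + 1) 0 := by
          have hc : ((k : Int) + 1) = ((k + 1 : Nat) : Int) := by push_cast; ring
          rw [hc]
          simp only [gM, PySem.List.pyGetD_natCast]
          exact (trim_getD matrix m0 i hi (k + 1) hk1).symm
        have hg : (k : Int) + 1 < (m0 : Int) := by exact_mod_cast hk1
        unfold cR cH2 edgeScore
        rw [e0, e1, if_pos hk1]
        split_ifs <;> omega
      · unfold cR cH2
        have hg : ¬ ((k : Int) + 1 < (m0 : Int)) := by exact_mod_cast hk1
        rw [if_neg hk1, if_neg (fun h => hg h.1), if_neg (fun h => hg h.1)]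
        rfl
    rw [List.map_congr_left hpt, ← hRi, zipTailSum edgeScore 0 Ri]
    rfl
  rw [List.map_congr_left hmain]
  have hlen : matrix.length = (matrix.map (fun row => row.take m0)).length := by simp
  rw [hlen, rangeMapGetD hSum [] (matrix.map (fun row => row.take m0))]

-- the vertical half of A's sum is B's consecutive-rows zip sum
lemma Vpart (matrix : List (List Int)) (m0 : Nat)
    (hrows : ∀ row ∈ matrix, m0 ≤ row.length) :
    SS (matrix.length : Int) (m0 : Int)
        (fun i j => cD matrix (matrix.length : Int) i j + cV2 matrix (matrix.length : Int) i j)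
      = (((matrix.map (fun row => row.take m0)).zip
            (matrix.map (fun row => row.take m0)).tail).map (fun pr => vSum pr.1 pr.2)).sum := by
  rw [natSS]
  have hmain : ∀ i ∈ List.range matrix.length,
      ((List.range m0).map (fun k : Nat =>
          cD matrix (matrix.length : Int) (i : Int) (k : Int)
            + cV2 matrix (matrix.length : Int) (i : Int) (k : Int))).sum
        = (if i + 1 < (matrix.map (fun row => row.take m0)).length
            then vSum ((matrix.map (fun row => row.take m0)).getD i [])
                      ((matrix.map (fun row => row.take m0)).getD (i + 1) [])
            else 0) := by
    intro i hi
    rw [List.mem_range] at hi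
    by_cases hi1 : i + 1 < matrix.length
    · set Ri := (matrix.map (fun row => row.take m0)).getD i [] with hRidef
      set Ri1 := (matrix.map (fun row => row.take m0)).getD (i + 1) [] with hRi1def
      have hx : Ri.length = m0 := trim_len matrix m0 hrows i hi
      have hy : Ri1.length = m0 := trim_len matrix m0 hrows (i + 1) hi1
      have hgi : ((i : Int) + 1 < (matrix.length : Int)) := by exact_mod_cast hi1
      have hpt : ∀ k ∈ List.range m0,
          cD matrix (matrix.length : Int) i k + cV2 matrix (matrix.length : Int) i k
            = edgeScore (Ri.getD k 0) (Ri1.getD k 0) := by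
        intro k hk
        rw [List.mem_range] at hk
        have e0 : gM matrix i k = Ri.getD k 0 := by
          simp only [gM, PySem.List.pyGetD_natCast]
          exact (trim_getD matrix m0 i hi k hk).symm
        have e1 : gM matrix ((i : Int) + 1) k = Ri1.getD k 0 := by
          have hc : ((i : Int) + 1) = ((i + 1 : Nat) : Int) := by push_cast; ring
          rw [hc]
          simp only [gM, PySem.List.pyGetD_natCast]
          exact (trim_getD matrix m0 (i + 1) hi1 k hk).symm
        unfold cD cV2 edgeScore
        rw [e0, e1]
        split_ifs <;> omega
      rw [List.map_congr_left hpt,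
          if_pos (by simpa using hi1 : i + 1 < (matrix.map (fun row => row.take m0)).length)]
      rw [← hx, zipPairSum edgeScore Ri Ri1 (by rw [hx, hy])]
      rfl
    · have hgi : ¬ ((i : Int) + 1 < (matrix.length : Int)) := by exact_mod_cast hi1
      have hz : (List.range m0).map (fun k : Nat =>
            cD matrix (matrix.length : Int) (i : Int) (k : Int)
              + cV2 matrix (matrix.length : Int) (i : Int) (k : Int))
          = (List.range m0).map (fun _ => (0 : Int)) := by
        apply List.map_congr_left
        intro k _
        unfold cD cV2
        rw [if_neg (fun h => hgi h.1), if_neg (fun h => hgi h.1)]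
        rfl
      rw [hz, if_neg (by simpa using hi1)]
      simp
  rw [List.map_congr_left hmain]
  have hlen : matrix.length = (matrix.map (fun row => row.take m0)).length := by simp
  rw [hlen, zipTailSum vSum [] (matrix.map (fun row => row.take m0))]

lemma main_eq (matrix : List (List Int)) (hpre : Pre_findCoverage matrix) :
    findCoverage matrix = findCoverage_alt matrix := by
  obtain ⟨hne, hrows⟩ := hpre
  have hhead : PySem.List.pyGetD matrix 0 [] = matrix.headD [] := by
    cases matrix with
    | nil => exact absurd rfl hne
    | cons r t => simp [PySem.List.pyGetD_zero]
  have hm : PySem.List.len (PySem.List.pyGetD matrix 0 [])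
      = (((matrix.headD []).length : Nat) : Int) := by
    rw [hhead]; simp
  have hn : PySem.List.len matrix = ((matrix.length : Nat) : Int) := by simp
  have hslice : (fun row => PySem.List.slice row none
        (some (PySem.List.len (PySem.List.pyGetD matrix 0 []))))
      = fun row : List Int => row.take (matrix.headD []).length := by
    funext row
    rw [hm, PySem.List.slice_to row (by positivity)]
    simp
  rw [A_eq_SS, B_eq_sums, hslice, hm, hn]
  rw [← SS_add _ _ (cR matrix _) (cH2 matrix _), add_assoc,
      ← SS_add _ _ (cD matrix _) (cV2 matrix _)]
  rw [Hpart matrix (matrix.headD []).length hrows, Vpart matrix (matrix.headD []).length hrows]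

-- ===== VERDICT (by name: the statement is the Claim_ definition above) =====
theorem findCoverage_spec : Claim_equal_findCoverage := by
  intro matrix _ hpre
  unfold Spec_findCoverage
  exact main_eq matrix hpre
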